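-- pv_equiv track=rewrite | github.com/ckw017/showdown.py | showdown/utils.py | _extract_nums
-- ===== SOURCE A (Python) =====
-- def _extract_nums(row):
--     """
--     Maybe if I indicate this to be a private method,
--     I don't have to take responsibility for it.
--     """
--     stat_list = ['hp', 'atk', 'def', 'spa', 'spd', 'spe']
--     stats = [''] * 6
--     row = row[4:].strip().lower()
--     num_stats = map(lambda s: s.strip(), row.split('/'))
--     for num_stat in num_stats:
--         try:
--             num, stat = num_stat.split()
--             stats[stat_list.index(stat)] = num
--         except:
--             pass
--     return stats
-- ===== SOURCE B (Python) =====
-- def _extract_nums(row):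
--     stat_list = ['hp', 'atk', 'def', 'spa', 'spd', 'spe']
--     tokens = [t.strip().split() for t in row[4:].strip().lower().split('/')]
--     result = []
--     for stat in stat_list:
--         value = ''
--         for parts in tokens:
--             if len(parts) == 2 and parts[1] == stat:
--                 value = parts[0]
--         result.append(value)
--     return result
-- ===== Notes on version B (the rewrite author's own statement) =====
-- stated objective: alternative
-- what changed: Replaces the single mutation pass that writes each parsed token into a positional slot via stat_list.index under try/except with an exception-free two-level scan: tokens are split once, then for each stat in canonical order the token list is scanned for the last matching two-part token.
import Mathlib
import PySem

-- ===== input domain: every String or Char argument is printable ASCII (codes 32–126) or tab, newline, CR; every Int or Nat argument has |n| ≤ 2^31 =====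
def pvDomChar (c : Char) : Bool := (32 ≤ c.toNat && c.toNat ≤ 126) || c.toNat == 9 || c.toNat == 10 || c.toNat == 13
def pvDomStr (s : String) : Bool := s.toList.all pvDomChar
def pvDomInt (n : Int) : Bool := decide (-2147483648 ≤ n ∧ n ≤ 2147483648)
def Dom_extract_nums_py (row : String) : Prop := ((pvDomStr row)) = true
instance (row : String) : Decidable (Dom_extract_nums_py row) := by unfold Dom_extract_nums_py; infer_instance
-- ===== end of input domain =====

-- B replaces A's positional-slot mutation via stat_list.index/try-except by an exception-free
-- per-stat scan over the once-split tokens (alternative decomposition, same cost).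

-- ===== PORT A =====
def pvStatList : List String := ["hp", "atk", "def", "spa", "spd", "spe"]

-- core of A's loop body on the already-whitespace-split token: the try block
-- (unpack failure and ValueError from .index are the silently-caught exceptions → the fall-through arms)
def pvStepCore (stats : List String) (parts : List String) : List String :=
  match parts with
  | [num, stat] =>
    match PySem.List.index? pvStatList stat with
    | some i => PySem.List.pySetD stats (i : Int) num
    | none => stats
  | _ => stats

-- A's loop body: num, stat = num_stat.split(); stats[stat_list.index(stat)] = num, except: pass
def pvStepA (stats : List String) (num_stat : String) : List String :=
  pvStepCore stats (PySem.Str.split₀ num_stat)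

def extract_nums_py (row : String) : List String :=
  let stats : List String := ["", "", "", "", "", ""]
  let row := PySem.Str.lower (PySem.Str.strip (PySem.Str.slice row (some 4) none))
  let num_stats := ((PySem.Str.split? row "/").getD []).map PySem.Str.strip
  num_stats.foldl pvStepA stats

-- ===== PORT B =====
-- B's inner-loop body: if len(parts) == 2 and parts[1] == stat: value = parts[0]
def pvPick (stat : String) (value : String) (parts : List String) : String :=
  match parts with
  | [num, st] => if st == stat then num else value
  | _ => value

def extract_nums_py_alt (row : String) : List String :=
  let row := PySem.Str.lower (PySem.Str.strip (PySem.Str.slice row (some 4) none))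
  let tokens := ((PySem.Str.split? row "/").getD []).map
    (fun t => PySem.Str.split₀ (PySem.Str.strip t))
  pvStatList.map (fun stat => tokens.foldl (pvPick stat) "")

-- ===== PRECONDITION & SPEC =====
def Spec_extract_nums_py (row : String) (out : List String) : Prop := out = extract_nums_py_alt row
instance (row : String) (out : List String) : Decidable (Spec_extract_nums_py row out) := by unfold Spec_extract_nums_py; infer_instance

-- ===== CLAIM (what is proved, stated in full; the proofs are below) =====
def Claim_equal_extract_nums_py : Prop := ∀ (row : String), Dom_extract_nums_py row → Spec_extract_nums_py row (extract_nums_py row)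

-- ===== LEMMAS AND PROOFS =====

-- one step of A's fold acts on each of the six slots exactly like B's per-stat step
theorem pv_step_eq (p : List String) (s0 s1 s2 s3 s4 s5 : String) :
    pvStepCore [s0, s1, s2, s3, s4, s5] p =
      [pvPick "hp" s0 p, pvPick "atk" s1 p, pvPick "def" s2 p,
       pvPick "spa" s3 p, pvPick "spd" s4 p, pvPick "spe" s5 p] := by
  match p with
  | [] => rfl
  | [_] => rfl
  | _ :: _ :: _ :: _ => rfl
  | [num, stat] =>
    by_cases h0 : stat = "hp"
    · subst h0; rfl
    by_cases h1 : stat = "atk"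
    · subst h1; rfl
    by_cases h2 : stat = "def"
    · subst h2; rfl
    by_cases h3 : stat = "spa"
    · subst h3; rfl
    by_cases h4 : stat = "spd"
    · subst h4; rfl
    by_cases h5 : stat = "spe"
    · subst h5; rfl
    have hnone : PySem.List.index? pvStatList stat = none := by
      rw [PySem.List.index?_eq_none_iff]
      simp [pvStatList, h0, h1, h2, h3, h4, h5]
    simp only [pvStepCore, hnone]
    simp [pvPick, beq_iff_eq, h0, h1, h2, h3, h4, h5]

-- A's whole fold equals the six independent per-stat folds of B
theorem pv_fold_eq (ps : List (List String)) (s0 s1 s2 s3 s4 s5 : String) :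
    ps.foldl pvStepCore [s0, s1, s2, s3, s4, s5] =
      [ps.foldl (pvPick "hp") s0, ps.foldl (pvPick "atk") s1,
       ps.foldl (pvPick "def") s2, ps.foldl (pvPick "spa") s3,
       ps.foldl (pvPick "spd") s4, ps.foldl (pvPick "spe") s5] := by
  induction ps generalizing s0 s1 s2 s3 s4 s5 with
  | nil => rfl
  | cons p ps ih =>
    simp only [List.foldl_cons, pv_step_eq]
    exact ih _ _ _ _ _ _

-- ===== VERDICT (by name: the statement is the Claim_ definition above) =====
theorem extract_nums_py_spec : Claim_equal_extract_nums_py := by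
  intro row _
  unfold Spec_extract_nums_py extract_nums_py extract_nums_py_alt
  rw [show pvStepA = fun st t => pvStepCore st (PySem.Str.split₀ t) from rfl]
  rw [← List.foldl_map (f := PySem.Str.split₀), List.map_map]
  rw [pv_fold_eq]
  rfl
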